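-- pv_equiv track=rewrite | github.com/Sambrow90/Tower-Defence-Test | game/td/core/path.py | _longest_path_from_left_to_right
-- ===== SOURCE A (Python) =====
-- from collections import deque
--
-- def _bfs(adjacency, start):
--     queue = deque([start])
--     parent = {start: None}
--     dist = {start: 0}
--     while queue:
--         cell = queue.popleft()
--         for nb in adjacency[cell]:
--             if nb not in parent:
--                 parent[nb] = cell
--                 dist[nb] = dist[cell] + 1
--                 queue.append(nb)
--     return parent, dist
--
-- def _reconstruct_path(parent, end):
--     path = []
--     cur = end
--     while cur is not None:
--         path.append(cur)
--         cur = parent[cur]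
--     path.reverse()
--     return path
--
-- def _longest_path_from_left_to_right(adjacency, cols, rows):
--     left_candidates = [(0, r) for r in range(rows)]
--     best_path = []
--     for start in left_candidates:
--         parent, dist = _bfs(adjacency, start)
--         best_end = None
--         best_dist = -1
--         for cell, d in dist.items():
--             if cell[0] == cols - 1 and d > best_dist:
--                 best_dist = d
--                 best_end = cell
--         if best_end is None:
--             continue
--         candidate = _reconstruct_path(parent, best_end)
--         if len(candidate) > len(best_path):
--             best_path = candidate
--     return best_path
-- ===== SOURCE B (Python) =====
-- from collections import deque
--
-- def _longest_path_from_left_to_right(adjacency, cols, rows):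
--     best_path = []
--     for r in range(rows):
--         start = (0, r)
--         paths = {start: [start]}
--         queue = deque([(start, [start])])
--         while queue:
--             cell, path = queue.popleft()
--             for nb in adjacency[cell]:
--                 if nb not in paths:
--                     ext = path + [nb]
--                     paths[nb] = ext
--                     queue.append((nb, ext))
--         best = None
--         for cell, path in paths.items():
--             if cell[0] == cols - 1 and (best is None or len(best) < len(path)):
--                 best = path
--         if best is not None and len(best_path) < len(best):
--             best_path = best
--     return best_path
-- ===== Notes on version B (the rewrite author's own statement) =====
-- stated objective: simpler
-- what changed: The BFS frontier carries each node's full path (paths[nb] = path + [nb]) instead of parent pointers plus a dist dict, so the separate _reconstruct_path pass and the parent/dist bookkeeping disappear; the best right-column path is picked directly by length in the same discovery order with the same strict-greater first-wins rule.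
-- outside the precondition, e.g. on _longest_path_from_left_to_right({(0, 0): [], (5, 5): [(9, 9)]}, 1, 1): A returns [(0, 0)], B returns [(0, 0)]
import Mathlib
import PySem

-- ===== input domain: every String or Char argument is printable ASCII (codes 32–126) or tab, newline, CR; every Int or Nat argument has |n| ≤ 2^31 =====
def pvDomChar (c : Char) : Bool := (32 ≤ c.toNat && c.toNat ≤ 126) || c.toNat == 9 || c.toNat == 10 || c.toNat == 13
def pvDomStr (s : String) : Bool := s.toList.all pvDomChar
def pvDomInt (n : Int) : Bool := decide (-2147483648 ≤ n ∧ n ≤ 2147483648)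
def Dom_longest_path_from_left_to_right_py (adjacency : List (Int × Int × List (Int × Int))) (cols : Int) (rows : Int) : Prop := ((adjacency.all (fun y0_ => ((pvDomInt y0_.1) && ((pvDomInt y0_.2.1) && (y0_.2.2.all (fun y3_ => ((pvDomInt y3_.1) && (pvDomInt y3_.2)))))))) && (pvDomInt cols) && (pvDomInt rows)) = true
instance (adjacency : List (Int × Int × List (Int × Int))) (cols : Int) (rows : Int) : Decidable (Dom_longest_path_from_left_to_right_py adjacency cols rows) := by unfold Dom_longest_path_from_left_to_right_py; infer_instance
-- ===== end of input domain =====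

-- B replaces A's parent/dist dicts and the _reconstruct_path pass by a BFS whose frontier
-- carries each node's full path; same return value, no speed claim (objective: simpler).

-- ===== PORT A =====
-- port of _reconstruct_path (fuel = adjacency.length + 1; never exhausted on BFS-built parents under Pre_)
def pvReconA (parent : PySem.Dict (Int × Int) (Option (Int × Int))) :
    Nat → Option (Int × Int) → List (Int × Int) → List (Int × Int)
  | _, none, acc => acc.reverse
  | 0, some _, acc => acc.reverse
  | fuel+1, some cur, acc => pvReconA parent fuel (parent.getD cur none) (acc ++ [cur])

-- port of _bfs's while loop (fuel bounds the number of dequeues; under Pre_ it never runs out)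
def pvBfsA (adj : PySem.Dict (Int × Int) (List (Int × Int))) :
    Nat → List (Int × Int) →
    PySem.Dict (Int × Int) (Option (Int × Int)) → PySem.Dict (Int × Int) Int →
    PySem.Dict (Int × Int) (Option (Int × Int)) × PySem.Dict (Int × Int) Int
  | 0, _, parent, dist => (parent, dist)
  | _+1, [], parent, dist => (parent, dist)
  | fuel+1, cell :: rest, parent, dist =>
    let s := (adj.getD cell []).foldl
      (fun (s : PySem.Dict (Int × Int) (Option (Int × Int)) × PySem.Dict (Int × Int) Int × List (Int × Int)) nb =>
        if s.1.contains nb then s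
        else (s.1.insert nb (some cell), s.2.1.insert nb (s.2.1.getD cell 0 + 1), s.2.2 ++ [nb]))
      (parent, dist, rest)
    pvBfsA adj fuel s.2.2 s.1 s.2.1

def longest_path_from_left_to_right_py (adjacency : List (Int × Int × List (Int × Int))) (cols : Int) (rows : Int) : List (Int × Int) :=
  let adj : PySem.Dict (Int × Int) (List (Int × Int)) := PySem.Dict.mk (adjacency.map (fun e => ((e.1, e.2.1), e.2.2)))
  ((PySem.List.pyRange 0 rows 1).map (fun r => ((0 : Int), r))).foldl
    (fun best_path start =>
      let pd := pvBfsA adj (adjacency.length + 1) [start]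
        ((PySem.Dict.empty).insert start none) ((PySem.Dict.empty).insert start 0)
      let sel := pd.2.items.foldl
        (fun (s : Option (Int × Int) × Int) cd =>
          if cd.1.1 = cols - 1 ∧ s.2 < cd.2 then (some cd.1, cd.2) else s)
        (none, -1)
      match sel.1 with
      | none => best_path
      | some e =>
        let candidate := pvReconA pd.1 (adjacency.length + 1) (some e) []
        if best_path.length < candidate.length then candidate else best_path)
    []

-- ===== PORT B =====
-- path-carrying BFS: the queue holds (cell, path), paths maps each discovered cell to its path
def pvBfsB (adj : PySem.Dict (Int × Int) (List (Int × Int))) :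
    Nat → List ((Int × Int) × List (Int × Int)) →
    PySem.Dict (Int × Int) (List (Int × Int)) →
    PySem.Dict (Int × Int) (List (Int × Int))
  | 0, _, paths => paths
  | _+1, [], paths => paths
  | fuel+1, (cell, path) :: rest, paths =>
    let s := (adj.getD cell []).foldl
      (fun (s : PySem.Dict (Int × Int) (List (Int × Int)) × List ((Int × Int) × List (Int × Int))) nb =>
        if s.1.contains nb then s
        else (s.1.insert nb (path ++ [nb]), s.2 ++ [(nb, path ++ [nb])]))
      (paths, rest)
    pvBfsB adj fuel s.2 s.1

def longest_path_from_left_to_right_py_alt (adjacency : List (Int × Int × List (Int × Int))) (cols : Int) (rows : Int) : List (Int × Int) :=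
  let adj : PySem.Dict (Int × Int) (List (Int × Int)) := PySem.Dict.mk (adjacency.map (fun e => ((e.1, e.2.1), e.2.2)))
  ((PySem.List.pyRange 0 rows 1).map (fun r => ((0 : Int), r))).foldl
    (fun best_path start =>
      let paths := pvBfsB adj (adjacency.length + 1) [(start, [start])]
        ((PySem.Dict.empty).insert start [start])
      let best := paths.items.foldl
        (fun (b : Option (List (Int × Int))) cp =>
          match b with
          | none => if cp.1.1 = cols - 1 then some cp.2 else none
          | some p => if cp.1.1 = cols - 1 ∧ p.length < cp.2.length then some cp.2 else some p)
        none
      match best with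
      | none => best_path
      | some p => if best_path.length < p.length then p else best_path)
    []

-- ===== PRECONDITION & SPEC =====
-- Pre_ excludes inputs on which BFS reaches a cell that is not a key of adjacency, where A raises
-- KeyError; the closure is stated over ALL entries and starts (closed form), slightly wider than the
-- reachable set, so it also excludes some inputs with an unreachable missing neighbour on which A
-- returns (B returns the same value there).
def Pre_longest_path_from_left_to_right_py (adjacency : List (Int × Int × List (Int × Int))) (cols : Int) (rows : Int) : Prop :=
  rows ≤ 0 ∨
  ((∀ e ∈ adjacency, ∀ nb ∈ e.2.2, nb ∈ adjacency.map (fun e => (e.1, e.2.1))) ∧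
   (∀ r ∈ PySem.List.pyRange 0 rows 1, ((0 : Int), r) ∈ adjacency.map (fun e => (e.1, e.2.1))))
instance (adjacency : List (Int × Int × List (Int × Int))) (cols : Int) (rows : Int) : Decidable (Pre_longest_path_from_left_to_right_py adjacency cols rows) := by unfold Pre_longest_path_from_left_to_right_py; infer_instance

def pvWitness_longest_path_from_left_to_right_py : (List (Int × Int × List (Int × Int))) × Int × Int :=
  ([(0, 0, [(1, 0)]), (1, 0, []), (0, 1, [(1, 0)])], 2, 2)

def Spec_longest_path_from_left_to_right_py (adjacency : List (Int × Int × List (Int × Int))) (cols : Int) (rows : Int) (out : List (Int × Int)) : Prop := out = longest_path_from_left_to_right_py_alt adjacency cols rows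
instance (adjacency : List (Int × Int × List (Int × Int))) (cols : Int) (rows : Int) (out : List (Int × Int)) : Decidable (Spec_longest_path_from_left_to_right_py adjacency cols rows out) := by unfold Spec_longest_path_from_left_to_right_py; infer_instance

-- ===== CLAIM (what is proved, stated in full; the proofs are below) =====
def Claim_equal_longest_path_from_left_to_right_py : Prop := ∀ (adjacency : List (Int × Int × List (Int × Int))) (cols : Int) (rows : Int), Dom_longest_path_from_left_to_right_py adjacency cols rows → Pre_longest_path_from_left_to_right_py adjacency cols rows → Spec_longest_path_from_left_to_right_py adjacency cols rows (longest_path_from_left_to_right_py adjacency cols rows)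

-- ===== LEMMAS AND PROOFS =====

-- the reversed path r is exactly the parent-pointer walk from r.head
def RChainOK (parent : PySem.Dict (Int × Int) (Option (Int × Int))) : List (Int × Int) → Prop
  | [] => True
  | [c] => parent.getD c none = none
  | c :: b :: r => parent.getD c none = some b ∧ RChainOK parent (b :: r)

-- joint invariant of the two BFS states (A's parent dict vs B's paths dict)
def GoodItems (adjK : List (Int × Int))
    (parent : PySem.Dict (Int × Int) (Option (Int × Int)))
    (paths : PySem.Dict (Int × Int) (List (Int × Int))) : Prop :=
  paths.keys.Nodup ∧ parent.keys = paths.keys ∧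
  (∀ cp ∈ paths.items, cp.2.reverse.head? = some cp.1 ∧ RChainOK parent cp.2.reverse ∧
      cp.2.Nodup ∧ ∀ x ∈ cp.2, x ∈ paths.keys) ∧
  (∀ x ∈ paths.keys, x ∈ adjK)

lemma rchain_insert (parent : PySem.Dict (Int × Int) (Option (Int × Int)))
    (nb : Int × Int) (v : Option (Int × Int)) :
    ∀ r : List (Int × Int), RChainOK parent r → nb ∉ r → RChainOK (parent.insert nb v) r
  | [], _, _ => trivial
  | [c], h, hn => by
      simp only [RChainOK] at h ⊢
      rw [PySem.Dict.getD_insert]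
      simp only [List.mem_singleton] at hn
      simp [Ne.symm hn, h]
  | c :: b :: r, h, hn => by
      obtain ⟨h1, h2⟩ := h
      refine ⟨?_, rchain_insert parent nb v (b :: r) h2 (by simp at hn ⊢; tauto)⟩
      rw [PySem.Dict.getD_insert]
      have : c ≠ nb := by intro e; exact hn (e ▸ List.mem_cons_self)
      simp [this, h1]

lemma recon_of_rchain (parent : PySem.Dict (Int × Int) (Option (Int × Int))) :
    ∀ (r : List (Int × Int)) (e : Int × Int) (F : Nat) (acc : List (Int × Int)),
      RChainOK parent (e :: r) → (e :: r).length ≤ F →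
      pvReconA parent F (some e) acc = (acc ++ (e :: r)).reverse
  | [], e, F, acc, h, hF => by
      simp only [List.length_singleton] at hF
      obtain ⟨F', rfl⟩ : ∃ F', F = F' + 1 := ⟨F - 1, by omega⟩
      simp only [RChainOK] at h
      simp [pvReconA, h]
  | b :: r, e, F, acc, h, hF => by
      simp only [List.length_cons] at hF
      obtain ⟨F', rfl⟩ : ∃ F', F = F' + 1 := ⟨F - 1, by omega⟩
      obtain ⟨h1, h2⟩ := h
      simp only [pvReconA, h1]
      rw [recon_of_rchain parent r b F' (acc ++ [e]) h2 (by simp; omega)]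
      simp

-- one step of the neighbour loop keeps the joint invariant
lemma fold_sim (adjK : List (Int × Int)) (cell : Int × Int) (path : List (Int × Int)) :
    ∀ (nbs : List (Int × Int)), (∀ nb ∈ nbs, nb ∈ adjK) →
    ∀ (parent : PySem.Dict (Int × Int) (Option (Int × Int)))
      (dist : PySem.Dict (Int × Int) Int)
      (qA : List (Int × Int))
      (paths : PySem.Dict (Int × Int) (List (Int × Int)))
      (qB : List ((Int × Int) × List (Int × Int))),
      GoodItems adjK parent paths →
      dist.items = paths.items.map (fun cp => (cp.1, (cp.2.length : Int) - 1)) →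
      qB = qA.map (fun c => (c, paths.getD c [])) →
      (∀ c ∈ qA, c ∈ paths.keys) →
      (cell, path) ∈ paths.items →
      let sA := nbs.foldl
        (fun (s : PySem.Dict (Int × Int) (Option (Int × Int)) × PySem.Dict (Int × Int) Int × List (Int × Int)) nb =>
          if s.1.contains nb then s
          else (s.1.insert nb (some cell), s.2.1.insert nb (s.2.1.getD cell 0 + 1), s.2.2 ++ [nb]))
        (parent, dist, qA)
      let sB := nbs.foldl
        (fun (s : PySem.Dict (Int × Int) (List (Int × Int)) × List ((Int × Int) × List (Int × Int))) nb =>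
          if s.1.contains nb then s
          else (s.1.insert nb (path ++ [nb]), s.2 ++ [(nb, path ++ [nb])]))
        (paths, qB)
      GoodItems adjK sA.1 sB.1 ∧
      sA.2.1.items = sB.1.items.map (fun cp => (cp.1, (cp.2.length : Int) - 1)) ∧
      sB.2 = sA.2.2.map (fun c => (c, sB.1.getD c [])) ∧
      (∀ c ∈ sA.2.2, c ∈ sB.1.keys) ∧
      (cell, path) ∈ sB.1.items := by
  intro nbs
  induction nbs with
  | nil =>
    intro _ parent dist qA paths qB h1 h2 h3 h4 h5
    exact ⟨h1, h2, h3, h4, h5⟩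
  | cons nb nbs ih =>
    intro hmem parent dist qA paths qB h1 h2 h3 h4 h5
    obtain ⟨hnd, hpk, hitems, hsub⟩ := h1
    have hdk : dist.keys = paths.keys := by
      simp only [PySem.Dict.keys, h2, List.map_map]; rfl
    simp only [List.foldl_cons]
    by_cases hc : nb ∈ paths.keys
    · -- already discovered: both sides skip
      have hcB : paths.contains nb = true := (PySem.Dict.contains_iff_mem_keys paths nb).2 hc
      have hcA : parent.contains nb = true := by
        rw [PySem.Dict.contains_iff_mem_keys, hpk]; exact hc
      rw [if_pos hcA, if_pos hcB]
      exact ih (fun x hx => hmem x (List.mem_cons_of_mem _ hx)) parent dist qA paths qB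
        ⟨hnd, hpk, hitems, hsub⟩ h2 h3 h4 h5
    · -- fresh neighbour: both sides extend
      have hcB : ¬ (paths.contains nb = true) := fun h =>
        hc ((PySem.Dict.contains_iff_mem_keys paths nb).1 h)
      have hcA : ¬ (parent.contains nb = true) := fun h => by
        rw [PySem.Dict.contains_iff_mem_keys, hpk] at h; exact hc h
      rw [if_neg hcA, if_neg hcB]
      have hcB' : paths.contains nb = false := by simpa using hcB
      have hcA' : parent.contains nb = false := by simpa using hcA
      have hcD' : dist.contains nb = false := by
        rw [← Bool.not_eq_true]
        intro h
        rw [PySem.Dict.contains_iff_mem_keys, hdk] at h; exact hc h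
      have hpathlen : dist.getD cell 0 = (path.length : Int) - 1 := by
        have hmemd : (cell, (path.length : Int) - 1) ∈ dist.items := by
          rw [h2]; exact List.mem_map_of_mem h5
        exact PySem.Dict.getD_of_mem_items dist hmemd (by rw [hdk]; exact hnd) 0
      have hkeys' : (paths.insert nb (path ++ [nb])).keys = paths.keys ++ [nb] :=
        PySem.Dict.keys_insert_of_not_contains paths (path ++ [nb]) hcB'
      have hkeysA' : (parent.insert nb (some cell)).keys = paths.keys ++ [nb] := by
        rw [PySem.Dict.keys_insert_of_not_contains parent (some cell) hcA', hpk]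
      have hitemsP' : (paths.insert nb (path ++ [nb])).items = paths.items ++ [(nb, path ++ [nb])] :=
        PySem.Dict.items_insert_of_not_contains paths (path ++ [nb]) hcB'
      have hchain : path.reverse.head? = some cell ∧ RChainOK parent path.reverse ∧
          path.Nodup ∧ ∀ x ∈ path, x ∈ paths.keys := hitems _ h5
      have hnbpath : nb ∉ path := fun h => hc (hchain.2.2.2 _ h)
      refine ih (fun x hx => hmem x (List.mem_cons_of_mem _ hx)) _ _ _ _ _
        ⟨?_, ?_, ?_, ?_⟩ ?_ ?_ ?_ ?_
      · -- nodup keys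
        rw [hkeys']
        exact hnd.append (List.nodup_singleton nb) (List.disjoint_singleton.2 hc)
      · rw [hkeysA', hkeys']
      · -- per-item facts
        rw [hitemsP']
        intro cp hcp
        rcases List.mem_append.1 hcp with hin | hnew
        · obtain ⟨e1, e2, e3, e4⟩ := hitems cp hin
          refine ⟨e1, rchain_insert _ _ _ _ e2 ?_, e3, fun x hx => by
            rw [hkeys']; exact List.mem_append_left _ (e4 x hx)⟩
          intro hmm
          exact hc (e4 nb (by simpa using hmm))
        · simp only [List.mem_singleton] at hnew
          subst hnew
          have hrev : (path ++ [nb]).reverse = nb :: path.reverse := by simp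
          refine ⟨by simp, ?_, ?_, ?_⟩
          · rw [hrev]
            have hstep : (parent.insert nb (some cell)).getD nb none = some cell :=
              PySem.Dict.getD_insert_self parent nb (some cell) none
            rcases hrv : path.reverse with _ | ⟨c0, r0⟩
            · exact absurd (hrv ▸ hchain.1) (by simp)
            · have hc0 : c0 = cell := by
                have h0 := hchain.1; rw [hrv] at h0; simpa using h0
              rw [hc0]
              have hnotin : nb ∉ path.reverse := by simpa using hnbpath
              have hstab := rchain_insert parent nb (some cell) path.reverse hchain.2.1 hnotin
              rw [hrv, hc0] at hstab
              exact ⟨hstep, hstab⟩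
          · exact hchain.2.2.1.append (List.nodup_singleton nb) (List.disjoint_singleton.2 hnbpath)
          · intro x hx
            rw [hkeys']
            rcases List.mem_append.1 hx with h | h
            · exact List.mem_append_left _ (hchain.2.2.2 x h)
            · simp at h; subst h; exact List.mem_append_right _ List.mem_cons_self
      · -- keys in adjK
        intro x hx
        rw [hkeys'] at hx
        rcases List.mem_append.1 hx with h | h
        · exact hsub x h
        · simp at h; subst h; exact hmem _ List.mem_cons_self
      · -- dist items relation
        rw [PySem.Dict.items_insert_of_not_contains dist (dist.getD cell 0 + 1) hcD', h2, hitemsP']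
        simp [hpathlen]
      · -- queue correspondence
        rw [h3, List.map_append]
        congr 1
        · apply List.map_congr_left
          intro c hcq
          have : c ≠ nb := fun h => hc (h ▸ h4 c hcq)
          rw [PySem.Dict.getD_insert]
          simp [this]
        · simp [PySem.Dict.getD_insert_self]
      · -- queue cells discovered
        intro c hcq
        rw [hkeys']
        rcases List.mem_append.1 hcq with h | h
        · exact List.mem_append_left _ (h4 c h)
        · simp at h; subst h; exact List.mem_append_right _ List.mem_cons_self
      · -- (cell, path) still an item
        rw [hitemsP']; exact List.mem_append_left _ h5

-- the whole BFS keeps the joint invariant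
lemma bfs_sim (adj : PySem.Dict (Int × Int) (List (Int × Int))) (adjK : List (Int × Int))
    (hcl : ∀ (c : Int × Int), ∀ nb ∈ adj.getD c [], nb ∈ adjK) :
    ∀ (fuel : Nat)
      (qA : List (Int × Int))
      (parent : PySem.Dict (Int × Int) (Option (Int × Int)))
      (dist : PySem.Dict (Int × Int) Int)
      (paths : PySem.Dict (Int × Int) (List (Int × Int)))
      (qB : List ((Int × Int) × List (Int × Int))),
      GoodItems adjK parent paths →
      dist.items = paths.items.map (fun cp => (cp.1, (cp.2.length : Int) - 1)) →
      qB = qA.map (fun c => (c, paths.getD c [])) →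
      (∀ c ∈ qA, c ∈ paths.keys) →
      GoodItems adjK (pvBfsA adj fuel qA parent dist).1 (pvBfsB adj fuel qB paths) ∧
      (pvBfsA adj fuel qA parent dist).2.items =
        (pvBfsB adj fuel qB paths).items.map (fun cp => (cp.1, (cp.2.length : Int) - 1)) := by
  intro fuel
  induction fuel with
  | zero =>
    intro qA parent dist paths qB h1 h2 h3 h4
    exact ⟨h1, h2⟩
  | succ fuel ih =>
    intro qA parent dist paths qB h1 h2 h3 h4
    cases qA with
    | nil =>
      subst h3
      exact ⟨h1, h2⟩
    | cons cell rest =>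
      subst h3
      have hcellmem : cell ∈ paths.keys := h4 cell List.mem_cons_self
      have hitem : (cell, paths.getD cell []) ∈ paths.items := by
        simp only [PySem.Dict.keys] at hcellmem
        obtain ⟨cv, hcv, hfst⟩ := List.mem_map.1 hcellmem
        have : paths.getD cell [] = cv.2 := by
          have : (cell, cv.2) ∈ paths.items := by
            rw [← hfst]; exact hcv
          exact PySem.Dict.getD_of_mem_items paths this h1.1 []
        rw [this, ← hfst]
        exact hcv
      simp only [List.map_cons, pvBfsA, pvBfsB]
      have C := fold_sim adjK cell (paths.getD cell []) (adj.getD cell [])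
        (fun nb h => hcl cell nb h) parent dist rest paths
        (rest.map (fun c => (c, paths.getD c []))) h1 h2 rfl
        (fun c hcq => h4 c (List.mem_cons_of_mem _ hcq)) hitem
      exact ih _ _ _ _ _ C.1 C.2.1 C.2.2.1 C.2.2.2.1

lemma mk_get?_mem : ∀ (l : List ((Int × Int) × List (Int × Int))) (k : Int × Int) (v : List (Int × Int)),
    (PySem.Dict.mk l).get? k = some v → (k, v) ∈ l
  | [], k, v, h => by
      simpa using (show PySem.Dict.empty.get? k = some v from h).symm.trans
        (PySem.Dict.get?_empty k)
  | (k0, v0) :: rest, k, v, h => by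
      rw [PySem.Dict.get?_mk_cons] at h
      by_cases he : k0 == k
      · rw [if_pos he] at h
        have hk : k0 = k := by simpa using he
        have hv : v0 = v := by simpa using h
        subst hk; subst hv
        exact List.mem_cons_self
      · rw [if_neg he] at h
        exact List.mem_cons_of_mem _ (mk_get?_mem rest k v h)

-- the two selection folds stay in lock-step
lemma sel_sim (cols : Int) (paths : PySem.Dict (Int × Int) (List (Int × Int)))
    (hne : ∀ cp ∈ paths.items, cp.2.reverse.head? = some cp.1) :
    ∀ (l : List ((Int × Int) × List (Int × Int))),
      (∀ cp ∈ l, cp ∈ paths.items) →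
      ∀ (s : Option (Int × Int) × Int) (b : Option (List (Int × Int))),
      ((b = none ∧ s = (none, -1)) ∨
       (∃ e p, b = some p ∧ s = (some e, (p.length : Int) - 1) ∧ (e, p) ∈ paths.items)) →
      let sA := (l.map (fun cp => (cp.1, (cp.2.length : Int) - 1))).foldl
        (fun (s : Option (Int × Int) × Int) cd =>
          if cd.1.1 = cols - 1 ∧ s.2 < cd.2 then (some cd.1, cd.2) else s) s
      let sB := l.foldl
        (fun (b : Option (List (Int × Int))) cp =>
          match b with
          | none => if cp.1.1 = cols - 1 then some cp.2 else none
          | some p => if cp.1.1 = cols - 1 ∧ p.length < cp.2.length then some cp.2 else some p) b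
      (sB = none ∧ sA = (none, -1)) ∨
      (∃ e p, sB = some p ∧ sA = (some e, (p.length : Int) - 1) ∧ (e, p) ∈ paths.items) := by
  intro l
  induction l with
  | nil => intro _ s b hR; exact hR
  | cons cp l ih =>
    intro hsub s b hR
    simp only [List.map_cons, List.foldl_cons]
    have hcple : 1 ≤ cp.2.length := by
      have := hne cp (hsub cp List.mem_cons_self)
      cases hp : cp.2.reverse with
      | nil => rw [hp] at this; simp at this
      | cons a t =>
        have := congrArg List.length hp
        simp at this
        omega
    have hsub' : ∀ x ∈ l, x ∈ paths.items := fun x hx => hsub x (List.mem_cons_of_mem _ hx)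
    have hcpmem : cp ∈ paths.items := hsub cp List.mem_cons_self
    rcases hR with ⟨hb, hs⟩ | ⟨e, p, hb, hs, hmem⟩
    · subst hb; subst hs
      by_cases hcol : cp.1.1 = cols - 1
      · have h1 := eq_true hcol
        have h2 := eq_true (show (-1 : Int) < (cp.2.length : Int) - 1 by omega)
        simp only [h1, h2, and_true, if_true]
        exact ih hsub' _ _ (Or.inr ⟨cp.1, cp.2, rfl, rfl, hcpmem⟩)
      · have h1 := eq_false hcol
        simp only [h1, false_and, if_false]
        exact ih hsub' _ _ (Or.inl ⟨rfl, rfl⟩)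
    · subst hb; subst hs
      by_cases hcol : cp.1.1 = cols - 1
      · by_cases hlen : p.length < cp.2.length
        · have h1 := eq_true hcol
          have h2 := eq_true (show (p.length : Int) - 1 < (cp.2.length : Int) - 1 by omega)
          have h3 := eq_true hlen
          simp only [h1, h2, h3, and_true, if_true]
          exact ih hsub' _ _ (Or.inr ⟨cp.1, cp.2, rfl, rfl, hcpmem⟩)
        · have h2 := eq_false (show ¬ ((p.length : Int) - 1 < (cp.2.length : Int) - 1) by omega)
          have h3 := eq_false hlen
          simp only [h2, h3, and_false, if_false]
          exact ih hsub' _ _ (Or.inr ⟨e, p, rfl, rfl, hmem⟩)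
      · have h1 := eq_false hcol
        simp only [h1, false_and, if_false]
        exact ih hsub' _ _ (Or.inr ⟨e, p, rfl, rfl, hmem⟩)

-- one outer-loop step computes the same candidate on both sides
lemma step_eq (adjacency : List (Int × Int × List (Int × Int))) (cols : Int)
    (start : Int × Int)
    (hpre1 : ∀ e ∈ adjacency, ∀ nb ∈ e.2.2, nb ∈ adjacency.map (fun e => (e.1, e.2.1)))
    (hstart : start ∈ adjacency.map (fun e => (e.1, e.2.1)))
    (best_path : List (Int × Int)) :
    (let adj : PySem.Dict (Int × Int) (List (Int × Int)) := PySem.Dict.mk (adjacency.map (fun e => ((e.1, e.2.1), e.2.2)))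
     let pd := pvBfsA adj (adjacency.length + 1) [start]
        ((PySem.Dict.empty).insert start none) ((PySem.Dict.empty).insert start 0)
     let sel := pd.2.items.foldl
        (fun (s : Option (Int × Int) × Int) cd =>
          if cd.1.1 = cols - 1 ∧ s.2 < cd.2 then (some cd.1, cd.2) else s)
        (none, -1)
     match sel.1 with
     | none => best_path
     | some e =>
        let candidate := pvReconA pd.1 (adjacency.length + 1) (some e) []
        if best_path.length < candidate.length then candidate else best_path) =
    (let adj : PySem.Dict (Int × Int) (List (Int × Int)) := PySem.Dict.mk (adjacency.map (fun e => ((e.1, e.2.1), e.2.2)))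
     let paths := pvBfsB adj (adjacency.length + 1) [(start, [start])]
        ((PySem.Dict.empty).insert start [start])
     let best := paths.items.foldl
        (fun (b : Option (List (Int × Int))) cp =>
          match b with
          | none => if cp.1.1 = cols - 1 then some cp.2 else none
          | some p => if cp.1.1 = cols - 1 ∧ p.length < cp.2.length then some cp.2 else some p)
        none
     match best with
     | none => best_path
     | some p => if best_path.length < p.length then p else best_path) := by
  set adjK : List (Int × Int) := adjacency.map (fun e => (e.1, e.2.1)) with hadjK
  set adj : PySem.Dict (Int × Int) (List (Int × Int)) :=
    PySem.Dict.mk (adjacency.map (fun e => ((e.1, e.2.1), e.2.2))) with hadj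
  have hcl : ∀ (c : Int × Int), ∀ nb ∈ adj.getD c [], nb ∈ adjK := by
    intro c nb hnb
    rcases hg : adj.get? c with _ | v
    · rw [PySem.Dict.getD_eq_get?_getD, hg] at hnb
      simp at hnb
    · rw [PySem.Dict.getD_eq_get?_getD, hg] at hnb
      simp only [Option.getD_some] at hnb
      have hmem := mk_get?_mem _ c v hg
      obtain ⟨e, he, heq⟩ := List.mem_map.1 hmem
      have hv : v = e.2.2 := by
        have := congrArg Prod.snd heq
        simpa using this.symm
      have hc : c = (e.1, e.2.1) := by
        have := congrArg Prod.fst heq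
        simpa using this.symm
      exact hpre1 e he nb (hv ▸ hnb)
  -- initial dicts
  have hcont : (PySem.Dict.empty : PySem.Dict (Int × Int) (List (Int × Int))).contains start = false :=
    PySem.Dict.contains_empty start
  have hcontP : (PySem.Dict.empty : PySem.Dict (Int × Int) (Option (Int × Int))).contains start = false :=
    PySem.Dict.contains_empty start
  have hcontD : (PySem.Dict.empty : PySem.Dict (Int × Int) Int).contains start = false :=
    PySem.Dict.contains_empty start
  have hitems0 : ((PySem.Dict.empty).insert start ([start] : List (Int × Int))).items = [(start, [start])] := by
    rw [PySem.Dict.items_insert_of_not_contains _ _ hcont]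
    simp [PySem.Dict.empty]
  have hkeys0 : ((PySem.Dict.empty).insert start ([start] : List (Int × Int))).keys = [start] := by
    rw [PySem.Dict.keys_insert_of_not_contains _ _ hcont]
    simp [PySem.Dict.keys_empty]
  have hkeysP0 : ((PySem.Dict.empty).insert start (none : Option (Int × Int))).keys = [start] := by
    rw [PySem.Dict.keys_insert_of_not_contains _ _ hcontP]
    simp [PySem.Dict.keys_empty]
  have hitemsD0 : ((PySem.Dict.empty).insert start (0 : Int)).items = [(start, 0)] := by
    rw [PySem.Dict.items_insert_of_not_contains _ _ hcontD]
    simp [PySem.Dict.empty]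
  have hgood : GoodItems adjK ((PySem.Dict.empty).insert start (none : Option (Int × Int)))
      ((PySem.Dict.empty).insert start ([start] : List (Int × Int))) := by
    refine ⟨by rw [hkeys0]; simp, by rw [hkeysP0, hkeys0], ?_, ?_⟩
    · intro cp hcp
      rw [hitems0] at hcp
      simp only [List.mem_singleton] at hcp
      subst hcp
      refine ⟨by simp, ?_, by simp, by intro x hx; rw [hkeys0]; simpa using hx⟩
      show RChainOK _ [start]
      show ((PySem.Dict.empty).insert start (none : Option (Int × Int))).getD start none = none
      exact PySem.Dict.getD_insert_self _ _ _ _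
    · intro x hx
      rw [hkeys0] at hx
      simp only [List.mem_singleton] at hx
      subst hx
      exact hstart
  have hsim := bfs_sim adj adjK hcl (adjacency.length + 1) [start]
    ((PySem.Dict.empty).insert start none) ((PySem.Dict.empty).insert start 0)
    ((PySem.Dict.empty).insert start [start]) [(start, [start])]
    hgood
    (by rw [hitemsD0, hitems0]; simp)
    (by simp [PySem.Dict.getD_insert_self])
    (by intro c hcq; rw [hkeys0]; simpa using hcq)
  set pd := pvBfsA adj (adjacency.length + 1) [start]
    ((PySem.Dict.empty).insert start none) ((PySem.Dict.empty).insert start 0) with hpd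
  set paths := pvBfsB adj (adjacency.length + 1) [(start, [start])]
    ((PySem.Dict.empty).insert start [start]) with hpaths
  obtain ⟨⟨hnd, hpk, hitems, hsub⟩, hdistitems⟩ := hsim
  have hsel := sel_sim cols paths (fun cp h => (hitems cp h).1) paths.items
    (fun cp h => h) (none, -1) none (Or.inl ⟨rfl, rfl⟩)
  dsimp only at hsel
  dsimp only
  rw [hdistitems]
  rcases hsel with ⟨hB, hA⟩ | ⟨e, p, hB, hA, hmem⟩
  · rw [hB, hA]
  · rw [hB, hA]
    have hfacts := hitems (e, p) hmem
    obtain ⟨hhead, hchain, hnodup, hinkeys⟩ := hfacts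
    cases hrv : p.reverse with
    | nil => rw [hrv] at hhead; simp at hhead
    | cons c0 r0 =>
      have hc0 : c0 = e := by
        rw [hrv] at hhead; simpa using hhead
      subst hc0
      have hlenle : p.length ≤ adjacency.length := by
        have hsubperm : p.Subperm adjK := (List.Nodup.subperm hnodup
          (fun x hx => hsub x (hinkeys x hx)))
        have := hsubperm.length_le
        simpa [hadjK] using this
      have hreq : pvReconA pd.1 (adjacency.length + 1) (some c0) [] = p := by
        rw [recon_of_rchain pd.1 r0 c0 (adjacency.length + 1) []
          (hrv ▸ hchain) ?_]
        · rw [List.nil_append, ← hrv, List.reverse_reverse]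
        · have hlen := congrArg List.length hrv
          simp at hlen
          simp only [List.length_cons]
          omega
      show (if best_path.length < (pvReconA pd.1 (adjacency.length + 1) (some c0) []).length
          then pvReconA pd.1 (adjacency.length + 1) (some c0) [] else best_path) =
        (if best_path.length < p.length then p else best_path)
      rw [hreq]

theorem longest_path_from_left_to_right_py_spec : Claim_equal_longest_path_from_left_to_right_py := by
  intro adjacency cols rows _ hpre
  unfold Spec_longest_path_from_left_to_right_py
  unfold longest_path_from_left_to_right_py longest_path_from_left_to_right_py_alt
  rcases hpre with hneg | ⟨hpre1, hpre2⟩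
  · have h0 : (rows - 0).toNat = 0 := by omega
    have hempty : PySem.List.pyRange 0 rows 1 = [] := by
      rw [PySem.List.pyRange_one, h0]
      rfl
    rw [hempty]
    rfl
  · apply PySem.List.foldl_congr_mem
    intro best_path start hstart
    obtain ⟨r, hr, rfl⟩ := List.mem_map.1 hstart
    exact step_eq adjacency cols ((0 : Int), r) hpre1 (hpre2 r hr) best_path
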